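-- pv_equiv track=rewrite | github.com/SonnieGlaza/telega_stalker | app/game_logic.py | resolve_equipment_by_power
-- ===== SOURCE A (Python) =====
-- GEAR_PROGRESS: tuple[tuple[int, str, str], ...] = (
--     (0, "Куртка новичка", "Нож"),
--     (4, "Бронежилет сталкера", "ПМ"),
--     (8, "Усиленный бронекостюм", "АКС-74У"),
--     (13, "Штурмовой экзоскелет", "АН-94"),
-- )
--
-- def resolve_equipment_by_power(gear_power: int) -> tuple[str, str]:
--     armor = GEAR_PROGRESS[0][1]
--     weapon = GEAR_PROGRESS[0][2]
--     for threshold, armor_name, weapon_name in GEAR_PROGRESS: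
--         if gear_power >= threshold:
--             armor = armor_name
--             weapon = weapon_name
--     return armor, weapon
-- ===== SOURCE B (Python) =====
-- import bisect
--
-- GEAR_PROGRESS: tuple[tuple[int, str, str], ...] = (
--     (0, "Куртка новичка", "Нож"),
--     (4, "Бронежилет сталкера", "ПМ"),
--     (8, "Усиленный бронекостюм", "АКС-74У"),
--     (13, "Штурмовой экзоскелет", "АН-94"),
-- )
--
-- _THRESHOLDS = [t[0] for t in GEAR_PROGRESS]
--
-- def resolve_equipment_by_power(gear_power: int) -> tuple[str, str]:
--     idx = max(0, bisect.bisect_right(_THRESHOLDS, gear_power) - 1)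
--     return GEAR_PROGRESS[idx][1], GEAR_PROGRESS[idx][2]
-- ===== Notes on version B (the rewrite author's own statement) =====
-- stated objective: idiomatic
-- what changed: Replaced the scan-and-overwrite loop over the whole gear table with a direct index: bisect_right on the threshold list (clamped to 0) picks the tier in one lookup.
import Mathlib
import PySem

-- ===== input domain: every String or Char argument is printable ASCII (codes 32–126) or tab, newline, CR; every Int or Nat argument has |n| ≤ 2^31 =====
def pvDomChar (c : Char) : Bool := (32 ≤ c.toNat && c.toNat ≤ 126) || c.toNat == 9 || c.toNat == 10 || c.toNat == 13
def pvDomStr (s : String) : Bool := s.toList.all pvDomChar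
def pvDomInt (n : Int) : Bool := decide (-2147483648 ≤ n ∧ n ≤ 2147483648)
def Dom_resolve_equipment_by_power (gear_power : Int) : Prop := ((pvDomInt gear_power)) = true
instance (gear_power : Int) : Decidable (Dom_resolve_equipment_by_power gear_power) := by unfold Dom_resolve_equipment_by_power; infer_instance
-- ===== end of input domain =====

-- ===== PORT A =====
-- B replaces A's full linear scan with a direct table index computed by bisect (idiomatic).
def gearProgress : List (Int × String × String) :=
  [(0, "Куртка новичка", "Нож"),
   (4, "Бронежилет сталкера", "ПМ"),
   (8, "Усиленный бронекостюм", "АКС-74У"),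
   (13, "Штурмовой экзоскелет", "АН-94")]

def resolve_equipment_by_power (gear_power : Int) : String × String :=
  -- armor/weapon start at GEAR_PROGRESS[0][1]/[2], then the loop over the table overwrites them
  gearProgress.foldl
    (fun (st : String × String) t => if gear_power ≥ t.1 then (t.2.1, t.2.2) else st)
    ("Куртка новичка", "Нож")

-- ===== PORT B =====
def gearThresholds : List Int := gearProgress.map (fun t => t.1)

-- stdlib bisect.bisect_right on a sorted list = number of elements ≤ x (ported as the corresponding Lean function)
def bisectRight (xs : List Int) (x : Int) : Int :=
  (xs.countP (fun t => t ≤ x) : Nat)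

def resolve_equipment_by_power_alt (gear_power : Int) : String × String :=
  let idx : Int := max 0 (bisectRight gearThresholds gear_power - 1)
  match PySem.List.pyGet? gearProgress idx with
  | some t => (t.2.1, t.2.2)
  | none => ("", "")  -- unreachable: 0 ≤ idx ≤ 3

-- ===== PRECONDITION & SPEC =====
def Spec_resolve_equipment_by_power (gear_power : Int) (out : String × String) : Prop := out = resolve_equipment_by_power_alt gear_power
instance (gear_power : Int) (out : String × String) : Decidable (Spec_resolve_equipment_by_power gear_power out) := by unfold Spec_resolve_equipment_by_power; infer_instance

-- ===== CLAIM (what is proved, stated in full; the proofs are below) =====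
def Claim_equal_resolve_equipment_by_power : Prop := ∀ (gear_power : Int), Dom_resolve_equipment_by_power gear_power → Spec_resolve_equipment_by_power gear_power (resolve_equipment_by_power gear_power)

-- ===== LEMMAS AND PROOFS =====

-- ===== VERDICT (by name: the statement is the Claim_ definition above) =====
theorem resolve_equipment_by_power_spec : Claim_equal_resolve_equipment_by_power := by
  intro gp _
  unfold Spec_resolve_equipment_by_power
  unfold resolve_equipment_by_power resolve_equipment_by_power_alt bisectRight gearThresholds gearProgress
  by_cases h13 : (13:Int) ≤ gp
  · have h0 : (0:Int) ≤ gp := by omega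
    have h4 : (4:Int) ≤ gp := by omega
    have h8 : (8:Int) ≤ gp := by omega
    simp [List.countP, List.countP.go, h0, h4, h8, h13, PySem.List.pyGet?, PySem.List.pyIdx?]
  · by_cases h8 : (8:Int) ≤ gp
    · have h0 : (0:Int) ≤ gp := by omega
      have h4 : (4:Int) ≤ gp := by omega
      simp [List.countP, List.countP.go, h0, h4, h8, h13, PySem.List.pyGet?, PySem.List.pyIdx?]
    · by_cases h4 : (4:Int) ≤ gp
      · have h0 : (0:Int) ≤ gp := by omega
        simp [List.countP, List.countP.go, h0, h4, h8, h13, PySem.List.pyGet?, PySem.List.pyIdx?]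
      · by_cases h0 : (0:Int) ≤ gp
        · simp [List.countP, List.countP.go, h0, h4, h8, h13, PySem.List.pyGet?, PySem.List.pyIdx?]
        · simp [List.countP, List.countP.go, h0, h4, h8, h13, PySem.List.pyGet?, PySem.List.pyIdx?]
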